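-- pv_equiv track=rewrite | github.com/mulkymalikuldhrs/Agentic-AI-System | src/agents/agent_05_designer.py | _extract_style_preferences
-- ===== SOURCE A (Python) =====
-- from typing import Dict, List, Any, Optional
--
-- def _extract_style_preferences(request: str) -> Dict[str, Any]:
--     """Extract style preferences from request"""
--     request_lower = request.lower()
--
--     styles = {
--         'color_scheme': 'professional',  # default
--         'typography': 'modern',
--         'layout': 'clean',
--         'aesthetic': 'minimalist'
--     }
--
--     # Color preferences
--     if any(word in request_lower for word in ['colorful', 'vibrant', 'bright']):
--         styles['color_scheme'] = 'vibrant'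
--     elif any(word in request_lower for word in ['dark', 'black']):
--         styles['color_scheme'] = 'dark'
--     elif any(word in request_lower for word in ['warm', 'orange', 'red']):
--         styles['color_scheme'] = 'warm'
--
--     # Aesthetic preferences
--     if any(word in request_lower for word in ['modern', 'contemporary']):
--         styles['aesthetic'] = 'modern'
--     elif any(word in request_lower for word in ['classic', 'traditional']):
--         styles['aesthetic'] = 'classic'
--     elif any(word in request_lower for word in ['playful', 'fun']):
--         styles['aesthetic'] = 'playful'
--
--     return styles
-- ===== SOURCE B (Python) =====
-- # Different strategy: instead of short-circuiting if/elif chains, scan a flat keyword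
-- # table, collect ALL matching keywords as (priority, value) pairs, and select the
-- # winner by min-priority.  Correct because A's elif order is exactly priority order.
-- _DEFAULTS = {
--     'color_scheme': 'professional',
--     'typography': 'modern',
--     'layout': 'clean',
--     'aesthetic': 'minimalist',
-- }
--
-- _KEYWORDS = {
--     'color_scheme': [
--         ('colorful', 0, 'vibrant'), ('vibrant', 0, 'vibrant'), ('bright', 0, 'vibrant'),
--         ('dark', 1, 'dark'), ('black', 1, 'dark'),
--         ('warm', 2, 'warm'), ('orange', 2, 'warm'), ('red', 2, 'warm'),
--     ],
--     'aesthetic': [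
--         ('modern', 0, 'modern'), ('contemporary', 0, 'modern'),
--         ('classic', 1, 'classic'), ('traditional', 1, 'classic'),
--         ('playful', 2, 'playful'), ('fun', 2, 'playful'),
--     ],
-- }
--
-- def _extract_style_preferences(request: str):
--     request_lower = request.lower()
--     styles = dict(_DEFAULTS)
--     for key, table in _KEYWORDS.items():
--         hits = [(prio, value) for kw, prio, value in table if kw in request_lower]
--         if hits:
--             styles[key] = min(hits, key=lambda hit: hit[0])[1]
--     return styles
-- ===== Notes on version B (the rewrite author's own statement) =====
-- stated objective: alternative
-- what changed: Replaces A's short-circuiting if/elif chains with a flat keyword table that is scanned in full, collecting every matching keyword as a (priority, value) pair and then selecting the winner by minimal priority (collect-all-then-min instead of first-branch-wins).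
import Mathlib
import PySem

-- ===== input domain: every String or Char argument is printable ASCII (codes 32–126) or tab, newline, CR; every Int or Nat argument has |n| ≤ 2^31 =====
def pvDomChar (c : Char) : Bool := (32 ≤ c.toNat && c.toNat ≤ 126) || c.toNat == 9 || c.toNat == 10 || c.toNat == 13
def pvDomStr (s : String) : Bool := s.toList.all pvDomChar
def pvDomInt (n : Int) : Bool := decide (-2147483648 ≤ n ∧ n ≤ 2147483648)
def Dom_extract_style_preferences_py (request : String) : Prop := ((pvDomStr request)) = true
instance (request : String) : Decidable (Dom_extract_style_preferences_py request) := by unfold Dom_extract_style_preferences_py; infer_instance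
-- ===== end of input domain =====

-- B replaces A's short-circuiting if/elif chains by a flat keyword table scanned in full,
-- collecting every match as a (priority, value) pair and selecting the min-priority winner;
-- objective: alternative (collect-all-then-select instead of first-branch-wins).

-- ===== PORT A =====
def extract_style_preferences_py (request : String) : List (String × String) :=
  let request_lower := PySem.Str.lower request
  let styles : PySem.Dict String String := PySem.Dict.ofList
    [("color_scheme", "professional"), ("typography", "modern"),
     ("layout", "clean"), ("aesthetic", "minimalist")]
  let styles :=
    if ["colorful", "vibrant", "bright"].any (fun word => PySem.Str.isIn word request_lower) then
      styles.insert "color_scheme" "vibrant"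
    else if ["dark", "black"].any (fun word => PySem.Str.isIn word request_lower) then
      styles.insert "color_scheme" "dark"
    else if ["warm", "orange", "red"].any (fun word => PySem.Str.isIn word request_lower) then
      styles.insert "color_scheme" "warm"
    else styles
  let styles :=
    if ["modern", "contemporary"].any (fun word => PySem.Str.isIn word request_lower) then
      styles.insert "aesthetic" "modern"
    else if ["classic", "traditional"].any (fun word => PySem.Str.isIn word request_lower) then
      styles.insert "aesthetic" "classic"
    else if ["playful", "fun"].any (fun word => PySem.Str.isIn word request_lower) then
      styles.insert "aesthetic" "playful"
    else styles
  styles.items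

-- ===== PORT B =====
def pvDefaults : List (String × String) :=
  [("color_scheme", "professional"), ("typography", "modern"),
   ("layout", "clean"), ("aesthetic", "minimalist")]

def pvTableColor : List (String × Int × String) :=
  [("colorful", 0, "vibrant"), ("vibrant", 0, "vibrant"), ("bright", 0, "vibrant"),
   ("dark", 1, "dark"), ("black", 1, "dark"),
   ("warm", 2, "warm"), ("orange", 2, "warm"), ("red", 2, "warm")]

def pvTableAes : List (String × Int × String) :=
  [("modern", 0, "modern"), ("contemporary", 0, "modern"),
   ("classic", 1, "classic"), ("traditional", 1, "classic"),
   ("playful", 2, "playful"), ("fun", 2, "playful")]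

def pvKeywords : List (String × List (String × Int × String)) :=
  [("color_scheme", pvTableColor), ("aesthetic", pvTableAes)]

-- one iteration of Source B's loop body: collect all matching (priority, value) pairs,
-- then pick the first hit of minimal priority (min with key = PySem.List.min?);
-- 'occurs' is the occurrence test 'kw in request_lower'
def pvApplyTable (occurs : String → Bool) (d : PySem.Dict String String)
    (key : String) (table : List (String × Int × String)) : PySem.Dict String String :=
  let hits := (table.filter (fun t => occurs t.1)).map (fun t => t.2)
  match PySem.List.min? hits (fun x => x.1) with
  | some pv => d.insert key pv.2
  | none => d

def extract_style_preferences_py_alt (request : String) : List (String × String) :=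
  let request_lower := PySem.Str.lower request
  let styles : PySem.Dict String String := PySem.Dict.ofList pvDefaults
  (pvKeywords.foldl
    (fun d kt => pvApplyTable (fun word => PySem.Str.isIn word request_lower) d kt.1 kt.2)
    styles).items

-- ===== PRECONDITION & SPEC =====
def Spec_extract_style_preferences_py (request : String) (out : List (String × String)) : Prop := out = extract_style_preferences_py_alt request
instance (request : String) (out : List (String × String)) : Decidable (Spec_extract_style_preferences_py request out) := by unfold Spec_extract_style_preferences_py; infer_instance

-- ===== CLAIM (what is proved, stated in full; the proofs are below) =====
def Claim_equal_extract_style_preferences_py : Prop := ∀ (request : String), Dom_extract_style_preferences_py request → Spec_extract_style_preferences_py request (extract_style_preferences_py request)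

-- ===== LEMMAS AND PROOFS =====
-- Strategy: each table step depends on the occurrence predicate only through its values
-- on the table's keywords; reify those as Booleans (pbColor/pbAes), evaluate B's
-- filter+min step on them by decide, and match it against A's elif cascade.

def pbColor (b1 b2 b3 b4 b5 b6 b7 b8 : Bool) : String → Bool := fun w =>
  if w == "colorful" then b1 else if w == "vibrant" then b2 else if w == "bright" then b3
  else if w == "dark" then b4 else if w == "black" then b5
  else if w == "warm" then b6 else if w == "orange" then b7 else if w == "red" then b8
  else false

def pbAes (b1 b2 b3 b4 b5 b6 : Bool) : String → Bool := fun w =>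
  if w == "modern" then b1 else if w == "contemporary" then b2
  else if w == "classic" then b3 else if w == "traditional" then b4
  else if w == "playful" then b5 else if w == "fun" then b6
  else false

theorem min_color (b1 b2 b3 b4 b5 b6 b7 b8 : Bool) :
    PySem.List.min?
      ((pvTableColor.filter (fun t => pbColor b1 b2 b3 b4 b5 b6 b7 b8 t.1)).map (fun t => t.2))
      (fun x => x.1)
    = (if b1 || b2 || b3 then some ((0 : Int), "vibrant")
       else if b4 || b5 then some ((1 : Int), "dark")
       else if b6 || b7 || b8 then some ((2 : Int), "warm")
       else none) := by
  revert b1 b2 b3 b4 b5 b6 b7 b8; decide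

theorem min_aes (b1 b2 b3 b4 b5 b6 : Bool) :
    PySem.List.min?
      ((pvTableAes.filter (fun t => pbAes b1 b2 b3 b4 b5 b6 t.1)).map (fun t => t.2))
      (fun x => x.1)
    = (if b1 || b2 then some ((0 : Int), "modern")
       else if b3 || b4 then some ((1 : Int), "classic")
       else if b5 || b6 then some ((2 : Int), "playful")
       else none) := by
  revert b1 b2 b3 b4 b5 b6; decide

theorem pv_color_step (p : String → Bool) (d : PySem.Dict String String) :
    (if ["colorful", "vibrant", "bright"].any p then d.insert "color_scheme" "vibrant"
     else if ["dark", "black"].any p then d.insert "color_scheme" "dark"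
     else if ["warm", "orange", "red"].any p then d.insert "color_scheme" "warm"
     else d)
    = pvApplyTable p d "color_scheme" pvTableColor := by
  have hfil : pvTableColor.filter (fun t => p t.1)
      = pvTableColor.filter (fun t =>
          pbColor (p "colorful") (p "vibrant") (p "bright") (p "dark") (p "black")
            (p "warm") (p "orange") (p "red") t.1) := by
    refine List.filter_congr ?_
    intro t ht
    fin_cases ht <;> rfl
  simp only [pvApplyTable]
  rw [hfil, min_color]
  simp only [List.any_cons, List.any_nil, Bool.or_false]
  by_cases h1 : (p "colorful" || p "vibrant" || p "bright") = true <;>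
    by_cases h2 : (p "dark" || p "black") = true <;>
    by_cases h3 : (p "warm" || p "orange" || p "red") = true <;>
    simp_all [Bool.or_assoc]

theorem pv_aes_step (p : String → Bool) (d : PySem.Dict String String) :
    (if ["modern", "contemporary"].any p then d.insert "aesthetic" "modern"
     else if ["classic", "traditional"].any p then d.insert "aesthetic" "classic"
     else if ["playful", "fun"].any p then d.insert "aesthetic" "playful"
     else d)
    = pvApplyTable p d "aesthetic" pvTableAes := by
  have hfil : pvTableAes.filter (fun t => p t.1)
      = pvTableAes.filter (fun t =>
          pbAes (p "modern") (p "contemporary") (p "classic") (p "traditional")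
            (p "playful") (p "fun") t.1) := by
    refine List.filter_congr ?_
    intro t ht
    fin_cases ht <;> rfl
  simp only [pvApplyTable]
  rw [hfil, min_aes]
  simp only [List.any_cons, List.any_nil, Bool.or_false]
  by_cases h1 : (p "modern" || p "contemporary") = true <;>
    by_cases h2 : (p "classic" || p "traditional") = true <;>
    by_cases h3 : (p "playful" || p "fun") = true <;>
    simp_all

-- ===== VERDICT (by name: the statement is the Claim_ definition above) =====
theorem extract_style_preferences_py_spec : Claim_equal_extract_style_preferences_py := by
  intro request _
  unfold Spec_extract_style_preferences_py extract_style_preferences_py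
    extract_style_preferences_py_alt pvKeywords pvDefaults
  simp only [List.foldl]
  rw [pv_color_step (fun word => PySem.Str.isIn word (PySem.Str.lower request)),
      pv_aes_step (fun word => PySem.Str.isIn word (PySem.Str.lower request))]
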